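-- pv_equiv track=rewrite | github.com/Isa-florez/simulacro2 | visitors.py | generar_id
-- ===== SOURCE A (Python) =====
-- def ids_unicos(visitantes):
--     return set(v["id"] for v in visitantes if v.get("id"))
--
-- def generar_id(visitantes):
--     ids = ids_unicos(visitantes)
--     n = 1
--     while True:
--         candidate = f"V{n:04d}"
--         if candidate not in ids:
--             return candidate
--         n += 1
-- ===== SOURCE B (Python) =====
-- def generar_id(visitantes):
--     usados = set()
--     for v in visitantes:
--         s = v.get("id")
--         if s and s.startswith("V") and s[1:].isdigit():
--             n = int(s[1:])
--             if f"V{n:04d}" == s: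
--                 usados.add(n)
--     libre = 1
--     for n in sorted(usados):
--         if n == libre:
--             libre += 1
--         elif n > libre:
--             break
--     return f"V{libre:04d}"
-- ===== Notes on version B (the rewrite author's own statement) =====
-- stated objective: alternative
-- what changed: A probes the set of visitor-id strings candidate-by-candidate in an unbounded while-loop; B instead parses each id of the exact form V#### back to its integer, sorts the resulting numbers and finds the first gap in one ascending scan, formatting only the final answer.
import Mathlib
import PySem

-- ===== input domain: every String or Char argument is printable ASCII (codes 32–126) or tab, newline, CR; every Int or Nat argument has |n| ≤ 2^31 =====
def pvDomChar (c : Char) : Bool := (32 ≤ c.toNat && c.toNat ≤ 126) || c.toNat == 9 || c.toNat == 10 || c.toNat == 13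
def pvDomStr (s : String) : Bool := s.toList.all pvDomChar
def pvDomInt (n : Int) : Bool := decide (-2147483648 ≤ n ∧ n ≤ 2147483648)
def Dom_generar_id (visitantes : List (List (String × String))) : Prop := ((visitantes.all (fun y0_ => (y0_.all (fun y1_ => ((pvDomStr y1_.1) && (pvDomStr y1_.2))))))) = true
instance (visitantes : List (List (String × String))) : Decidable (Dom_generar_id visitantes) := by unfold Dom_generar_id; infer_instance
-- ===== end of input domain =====

-- B replaces A's probe-the-string-set while-loop by parse-the-used-numbers, sort, and a single
-- ascending scan for the first gap ("alternative"; not claimed faster).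

-- f"V{n:04d}" (exact: f"{n:04d}" = str(n).zfill(4); only ever called with n ≥ 0 here)
def pvFmt (n : Int) : String := String.ofList ('V' :: PySem.Chars.zfill (PySem.Int.toChars n) 4)

-- v.get("id") (first-match association-list lookup)
def pvGetId (v : List (String × String)) : Option String := (PySem.Dict.mk v).get? "id"

-- ===== PORT A =====
-- ids_unicos: set(v["id"] for v in visitantes if v.get("id"))  ("" and missing are falsy)
def pvIdList (visitantes : List (List (String × String))) : List String :=
  visitantes.filterMap (fun v =>
    match pvGetId v with
    | some s => if s = "" then none else some s
    | none => none)

def pvIdsA (visitantes : List (List (String × String))) : PySem.Set String :=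
  PySem.Set.ofList (pvIdList visitantes)

-- the while-True probe loop; fuel (len ids + 1) is a totality guard, the 0 branch is unreachable
def pvLoopA (ids : PySem.Set String) : Int → Nat → String
  | _, 0 => "V0001"
  | n, fuel+1 =>
    let candidate := pvFmt n
    if PySem.Set.contains ids candidate then pvLoopA ids (n+1) fuel else candidate

def generar_id (visitantes : List (List (String × String))) : String :=
  let ids := pvIdsA visitantes
  pvLoopA ids 1 (ids.length + 1)

-- ===== PORT B =====
-- int(s[1:]) ported by hand: under the `s[1:].isdigit()` guard the slice is a nonempty run of
-- ASCII digits, on which Python's int() is exactly this left-to-right base-10 fold (exact there).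
def pvParse (cs : List Char) : Int := cs.foldl (fun a c => a * 10 + ((c.toNat : Int) - 48)) 0

def pvUsados (visitantes : List (List (String × String))) : PySem.Set Int :=
  visitantes.foldl (fun u v =>
    match pvGetId v with
    | some s =>
      if s ≠ "" ∧ PySem.Str.startswith s "V" = true ∧
          PySem.Str.strIsdigit (PySem.Str.slice s (some 1) none) = true then
        let n := pvParse (PySem.Str.slice s (some 1) none).toList
        if pvFmt n = s then PySem.Set.add u n else u
      else u
    | none => u) PySem.Set.empty

-- the for-loop over sorted(usados) with its break
def pvScan : Int → List Int → Int
  | libre, [] => libre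
  | libre, n :: rest =>
    if n = libre then pvScan (libre + 1) rest
    else if libre < n then libre
    else pvScan libre rest

def generar_id_alt (visitantes : List (List (String × String))) : String :=
  let usados := pvUsados visitantes
  pvFmt (pvScan 1 (PySem.List.sorted usados (fun x => x)))

-- ===== PRECONDITION & SPEC =====
def Spec_generar_id (visitantes : List (List (String × String))) (out : String) : Prop := out = generar_id_alt visitantes
instance (visitantes : List (List (String × String))) (out : String) : Decidable (Spec_generar_id visitantes out) := by unfold Spec_generar_id; infer_instance

-- ===== CLAIM (what is proved, stated in full; the proofs are below) =====
def Claim_equal_generar_id : Prop := ∀ (visitantes : List (List (String × String))), Dom_generar_id visitantes → Spec_generar_id visitantes (generar_id visitantes)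

-- ===== LEMMAS AND PROOFS =====

-- ---- digits / parsing groundwork ----

theorem pv_digitChar_toNat (d : Nat) (hd : d < 10) : (Nat.digitChar d).toNat = 48 + d := by
  interval_cases d <;> decide

theorem pv_digitChar_isdigit (d : Nat) (hd : d < 10) : PySem.Chars.isdigit (Nat.digitChar d) = true := by
  interval_cases d <;> decide

-- toDigitsCore prepends something to ds
theorem pv_toDigitsCore_append (f : Nat) : ∀ (m : Nat) (ds : List Char),
    ∃ pre, Nat.toDigitsCore 10 f m ds = pre ++ ds := by
  induction f with
  | zero => intro m ds; exact ⟨[], rfl⟩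
  | succ f ih =>
    intro m ds
    rw [Nat.toDigitsCore]
    by_cases h : m / 10 = 0
    · exact ⟨[(m % 10).digitChar], by simp [h]⟩
    · obtain ⟨pre, hpre⟩ := ih (m / 10) ((m % 10).digitChar :: ds)
      exact ⟨pre ++ [(m % 10).digitChar], by simp [h, hpre]⟩

theorem pv_toDigits_ne_nil (m : Nat) : Nat.toDigits 10 m ≠ [] := by
  rw [Nat.toDigits, Nat.toDigitsCore]
  by_cases h : m / 10 = 0
  · simp [h]
  · obtain ⟨pre, hpre⟩ := pv_toDigitsCore_append m (m / 10) [(m % 10).digitChar]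
    simp [h, hpre]

-- every character produced by toDigitsCore (base 10) is an ASCII digit
theorem pv_toDigitsCore_isdigit (f : Nat) : ∀ (m : Nat) (ds : List Char),
    (∀ c ∈ ds, PySem.Chars.isdigit c = true) →
    ∀ c ∈ Nat.toDigitsCore 10 f m ds, PySem.Chars.isdigit c = true := by
  induction f with
  | zero => intro m ds h; exact h
  | succ f ih =>
    intro m ds h
    rw [Nat.toDigitsCore]
    have hdig : PySem.Chars.isdigit ((m % 10).digitChar) = true :=
      pv_digitChar_isdigit _ (Nat.mod_lt _ (by norm_num))
    by_cases hm : m / 10 = 0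
    · simp only [hm, reduceIte]
      intro c hc
      rcases List.mem_cons.mp hc with rfl | hc
      · exact hdig
      · exact h c hc
    · simp only [if_neg hm]
      refine ih (m / 10) _ ?_
      intro c hc
      rcases List.mem_cons.mp hc with rfl | hc
      · exact hdig
      · exact h c hc

theorem pv_toDigits_isdigit (m : Nat) : ∀ c ∈ Nat.toDigits 10 m, PySem.Chars.isdigit c = true :=
  pv_toDigitsCore_isdigit (m + 1) m [] (by intro c hc; cases hc)

-- one step of toDigitsCore at positive fuel
theorem pv_toDigitsCore_succ (f m : Nat) (ds : List Char) : Nat.toDigitsCore 10 (f+1) m ds =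
    if m / 10 = 0 then (m % 10).digitChar :: ds
    else Nat.toDigitsCore 10 f (m/10) ((m % 10).digitChar :: ds) := rfl

-- the base-10 fold reads toDigitsCore back
theorem pv_fold_toDigitsCore (f : Nat) : ∀ (m : Nat) (ds : List Char), m < f →
    ∃ p : Nat, ∀ a : Int,
      (Nat.toDigitsCore 10 f m ds).foldl (fun a c => a * 10 + ((c.toNat : Int) - 48)) a
        = ds.foldl (fun a c => a * 10 + ((c.toNat : Int) - 48)) (a * 10 ^ p + m) := by
  induction f with
  | zero => intro m ds h; omega
  | succ f ih =>
    intro m ds hmf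
    have h10 : m % 10 < 10 := Nat.mod_lt _ (by norm_num)
    by_cases hm : m / 10 = 0
    · refine ⟨1, fun a => ?_⟩
      have hmlt : m < 10 := by omega
      have hmm : m % 10 = m := Nat.mod_eq_of_lt hmlt
      rw [pv_toDigitsCore_succ, if_pos hm, List.foldl_cons]
      congr 1
      rw [pv_digitChar_toNat _ h10, hmm]
      push_cast
      ring
    · have hlt : m / 10 < f := by
        have h1 : m / 10 < m := Nat.div_lt_self (by omega) (by norm_num)
        omega
      obtain ⟨p, hp⟩ := ih (m / 10) ((m % 10).digitChar :: ds) hlt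
      refine ⟨p + 1, fun a => ?_⟩
      rw [pv_toDigitsCore_succ, if_neg hm, hp a, List.foldl_cons]
      congr 1
      rw [pv_digitChar_toNat _ h10]
      have h1 : ((m / 10 : Nat) : Int) * 10 + ((m % 10 : Nat) : Int) = (m : Int) := by
        push_cast
        omega
      rw [pow_succ]
      push_cast at h1 ⊢
      linear_combination h1

theorem pv_parse_toDigits (m : Nat) : pvParse (Nat.toDigits 10 m) = m := by
  obtain ⟨p, hp⟩ := pv_fold_toDigitsCore (m + 1) m [] (Nat.lt_succ_self m)
  unfold pvParse
  rw [Nat.toDigits] at *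
  rw [hp 0]
  simp

theorem pv_parse_zeros_append (k : Nat) (cs : List Char) :
    pvParse (List.replicate k '0' ++ cs) = pvParse cs := by
  unfold pvParse
  rw [List.foldl_append]
  congr 1
  induction k with
  | zero => rfl
  | succ k ih => rw [List.replicate_succ, List.foldl_cons]; simpa using ih

-- ---- the formatted string, decomposed ----

-- for n ≥ 0, the characters of f"V{n:04d}" are 'V', some '0'-padding, then the digits of n
theorem pvFmt_decomp (n : Int) (hn : 0 ≤ n) :
    ∃ k, (pvFmt n).toList = 'V' :: (List.replicate k '0' ++ Nat.toDigits 10 n.toNat) := by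
  have htc : PySem.Int.toChars n = Nat.toDigits 10 n.toNat := by
    unfold PySem.Int.toChars
    rw [if_neg (by omega)]
  unfold pvFmt
  rw [htc]
  simp only [String.toList_ofList]
  rcases hcs : Nat.toDigits 10 n.toNat with _ | ⟨c, rest⟩
  · exact absurd hcs (pv_toDigits_ne_nil _)
  · unfold PySem.Chars.zfill
    by_cases hlen : (4:Int) ≤ (c :: rest).length
    · exact ⟨0, by rw [if_pos hlen]; simp⟩
    · rw [if_neg hlen]
      have hc : PySem.Chars.isdigit c = true := by
        have := pv_toDigits_isdigit n.toNat c
        rw [hcs] at this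
        exact this List.mem_cons_self
      have hcne : ¬ (c = '+' ∨ c = '-') := by
        rintro (rfl | rfl) <;> exact absurd hc (by decide)
      exact ⟨Int.toNat 4 - (c :: rest).length, by simp [hcne]⟩

theorem pvFmt_toList_drop (n : Int) (hn : 0 ≤ n) :
    ∃ k, (pvFmt n).toList.drop 1 = List.replicate k '0' ++ Nat.toDigits 10 n.toNat := by
  obtain ⟨k, hk⟩ := pvFmt_decomp n hn
  exact ⟨k, by rw [hk]; rfl⟩

-- the slice s[1:] of the formatted string, as characters
theorem pv_slice_toList (s : String) :
    (PySem.Str.slice s (some 1) none).toList = s.toList.drop 1 := by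
  unfold PySem.Str.slice
  rw [PySem.Chars.slice_eq_listSlice, PySem.List.slice_from _ (by norm_num : (0:Int) ≤ 1)]
  simp

theorem pvFmt_parse (n : Int) (hn : 0 ≤ n) :
    pvParse (PySem.Str.slice (pvFmt n) (some 1) none).toList = n := by
  rw [pv_slice_toList]
  obtain ⟨k, hk⟩ := pvFmt_toList_drop n hn
  rw [hk, pv_parse_zeros_append, pv_parse_toDigits]
  omega

theorem pvFmt_startswith (n : Int) (hn : 0 ≤ n) : PySem.Str.startswith (pvFmt n) "V" = true := by
  obtain ⟨k, hk⟩ := pvFmt_decomp n hn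
  unfold PySem.Str.startswith
  rw [PySem.Chars.startswith_iff, hk]
  exact ⟨_, rfl⟩

theorem pvFmt_isdigit (n : Int) (hn : 0 ≤ n) :
    PySem.Str.strIsdigit (PySem.Str.slice (pvFmt n) (some 1) none) = true := by
  rw [PySem.Str.strIsdigit, pv_slice_toList]
  obtain ⟨k, hk⟩ := pvFmt_toList_drop n hn
  rw [hk]
  unfold PySem.Chars.strIsdigit
  have hne : Nat.toDigits 10 n.toNat ≠ [] := pv_toDigits_ne_nil _
  rw [Bool.and_eq_true]
  constructor
  · rcases k with _ | k
    · simpa [List.isEmpty_iff] using hne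
    · simp [List.replicate_succ]
  · rw [List.all_eq_true]
    intro c hc
    rcases List.mem_append.mp hc with hc | hc
    · have := List.eq_of_mem_replicate hc
      subst this; decide
    · exact pv_toDigits_isdigit _ c hc

theorem pvFmt_inj {a b : Int} (ha : 0 ≤ a) (hb : 0 ≤ b) (h : pvFmt a = pvFmt b) : a = b := by
  have := pvFmt_parse a ha
  rw [h, pvFmt_parse b hb] at this
  omega

-- ---- B's set, characterised ----

def pvParsedOf (v : List (String × String)) : Option Int :=
  match pvGetId v with
  | some s =>
    if s ≠ "" ∧ PySem.Str.startswith s "V" = true ∧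
        PySem.Str.strIsdigit (PySem.Str.slice s (some 1) none) = true then
      let n := pvParse (PySem.Str.slice s (some 1) none).toList
      if pvFmt n = s then some n else none
    else none
  | none => none

def pvParsedList (visitantes : List (List (String × String))) : List Int :=
  visitantes.filterMap pvParsedOf

theorem pvUsados_fold (xs : List (List (String × String))) (init : PySem.Set Int) :
    xs.foldl (fun u v =>
      match pvGetId v with
      | some s =>
        if s ≠ "" ∧ PySem.Str.startswith s "V" = true ∧
            PySem.Str.strIsdigit (PySem.Str.slice s (some 1) none) = true then
          let n := pvParse (PySem.Str.slice s (some 1) none).toList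
          if pvFmt n = s then PySem.Set.add u n else u
        else u
      | none => u) init
    = (pvParsedList xs).foldl PySem.Set.add init := by
  induction xs generalizing init with
  | nil => rfl
  | cons v xs ih =>
    simp only [pvParsedList, List.foldl_cons, List.filterMap_cons]
    cases h : pvGetId v with
    | none => simp only [pvParsedOf, h]; exact ih init
    | some s =>
      simp only [pvParsedOf, h]
      by_cases hg : s ≠ "" ∧ PySem.Str.startswith s "V" = true ∧
          PySem.Str.strIsdigit (PySem.Str.slice s (some 1) none) = true
      · rw [if_pos hg, if_pos hg]
        by_cases hf : pvFmt (pvParse (PySem.Str.slice s (some 1) none).toList) = s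
        · simp only [if_pos hf]
          rw [ih]
          rfl
        · simp only [if_neg hf]
          exact ih init
      · rw [if_neg hg, if_neg hg]
        exact ih init

theorem pvUsados_eq (visitantes : List (List (String × String))) :
    pvUsados visitantes = PySem.Set.ofList (pvParsedList visitantes) := by
  unfold pvUsados
  rw [pvUsados_fold, PySem.Set.ofList_eq_foldl]
  rfl

-- n ≥ 1 is in B's parsed list exactly when its formatted string is among A's collected ids
theorem pv_mem_parsed (visitantes : List (List (String × String))) (n : Int) (hn : 1 ≤ n) :
    n ∈ pvParsedList visitantes ↔ pvFmt n ∈ pvIdList visitantes := by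
  have hn0 : (0:Int) ≤ n := by omega
  constructor
  · intro h
    obtain ⟨v, hv, hf⟩ := List.mem_filterMap.mp h
    cases hg : pvGetId v with
    | none => simp [pvParsedOf, hg] at hf
    | some s =>
      simp only [pvParsedOf, hg] at hf
      by_cases hcond : s ≠ "" ∧ PySem.Str.startswith s "V" = true ∧
          PySem.Str.strIsdigit (PySem.Str.slice s (some 1) none) = true
      · rw [if_pos hcond] at hf
        by_cases hfmt : pvFmt (pvParse (PySem.Str.slice s (some 1) none).toList) = s
        · rw [if_pos hfmt, Option.some.injEq] at hf
          subst hf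
          refine List.mem_filterMap.mpr ⟨v, hv, ?_⟩
          simp only [hg]
          rw [if_neg hcond.1, hfmt]
        · rw [if_neg hfmt] at hf
          cases hf
      · rw [if_neg hcond] at hf
        cases hf
  · intro h
    obtain ⟨v, hv, hf⟩ := List.mem_filterMap.mp h
    cases hg : pvGetId v with
    | none => simp [hg] at hf
    | some s =>
      simp only [hg] at hf
      by_cases hs : s = ""
      · rw [if_pos hs] at hf; cases hf
      · rw [if_neg hs, Option.some.injEq] at hf
        subst hf
        refine List.mem_filterMap.mpr ⟨v, hv, ?_⟩
        simp only [pvParsedOf, hg]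
        rw [if_pos ⟨hs, pvFmt_startswith n hn0, pvFmt_isdigit n hn0⟩]
        rw [pvFmt_parse n hn0]
        simp

-- ---- A's loop returns the least free candidate ----

theorem pvLoopA_least (ids : PySem.Set String) :
    ∀ (fuel : Nat) (k n₀ : Int), k ≤ n₀ → n₀ < k + fuel →
      PySem.Set.contains ids (pvFmt n₀) = false →
      (∀ m, k ≤ m → m < n₀ → PySem.Set.contains ids (pvFmt m) = true) →
      pvLoopA ids k fuel = pvFmt n₀ := by
  intro fuel
  induction fuel with
  | zero => intro k n₀ h1 h2 _ _; exfalso; omega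
  | succ fuel ih =>
    intro k n₀ h1 h2 hfree hused
    rw [pvLoopA]
    by_cases hk : k = n₀
    · subst hk
      have hn : ¬ (PySem.Set.contains ids (pvFmt k) = true) := by
        intro h; rw [hfree] at h; cases h
      simp only [if_neg hn]
    · have hklt : k < n₀ := by omega
      rw [hused k le_rfl hklt, if_pos rfl]
      exact ih (k + 1) n₀ (by omega) (by push_cast at h2 ⊢; omega) hfree
        (fun m hm1 hm2 => hused m (by omega) hm2)

-- ---- B's scan returns the least absent value ----

theorem pvScan_least : ∀ (l : List Int), l.Pairwise (· < ·) →
    ∀ (e n₀ : Int), e ≤ n₀ → n₀ ∉ l →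
      (∀ m, e ≤ m → m < n₀ → m ∈ l) →
      pvScan e l = n₀ := by
  intro l
  induction l with
  | nil =>
    intro _ e n₀ h1 _ hall
    rw [pvScan]
    by_contra hne
    have : e < n₀ := lt_of_le_of_ne h1 (by simpa [pvScan] using hne)
    exact absurd (hall e le_rfl this) (List.not_mem_nil)
  | cons n rest ih =>
    intro hp e n₀ h1 hni hall
    have hpr : rest.Pairwise (· < ·) := hp.of_cons
    have hgt : ∀ m ∈ rest, n < m := fun m hm => List.rel_of_pairwise_cons hp hm
    rw [pvScan]
    by_cases hne : n = e
    · subst hne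
      rw [if_pos rfl]
      have hmem : n ∈ n :: rest := List.mem_cons_self
      have hlt : n < n₀ := lt_of_le_of_ne h1 (fun h => hni (h ▸ hmem))
      refine ih hpr (n + 1) n₀ (by omega) (fun h => hni (List.mem_cons_of_mem _ h)) ?_
      intro m hm1 hm2
      have := hall m (by omega) hm2
      rcases List.mem_cons.mp this with rfl | h
      · omega
      · exact h
    · rw [if_neg hne]
      by_cases hlt : e < n
      · rw [if_pos hlt]
        by_contra hne0
        have he : e < n₀ := lt_of_le_of_ne h1 hne0
        have := hall e le_rfl he
        rcases List.mem_cons.mp this with rfl | h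
        · omega
        · exact absurd (hgt _ h) (by omega)
      · rw [if_neg hlt]
        have hnlt : n < e := by omega
        refine ih hpr e n₀ h1 (fun h => hni (List.mem_cons_of_mem _ h)) ?_
        intro m hm1 hm2
        have := hall m hm1 hm2
        rcases List.mem_cons.mp this with rfl | h
        · omega
        · exact h

-- ---- existence of a free candidate within the fuel bound (pigeonhole) ----

theorem pv_exists_free (ids : PySem.Set String) :
    ∃ j : Nat, j ≤ ids.length ∧ PySem.Set.contains ids (pvFmt (1 + (j : Int))) = false := by
  by_contra hcon
  push Not at hcon
  have hall : ∀ j : Nat, j ≤ ids.length → pvFmt (1 + (j : Int)) ∈ (ids : List String) := by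
    intro j hj
    have := hcon j hj
    have h2 : PySem.Set.contains ids (pvFmt (1 + (j : Int))) = true := by
      cases h : PySem.Set.contains ids (pvFmt (1 + (j : Int)))
      · exact absurd h this
      · rfl
    exact (PySem.Set.contains_iff ids _).mp h2
  set L := (List.range (ids.length + 1)).map (fun j : Nat => pvFmt (1 + (j : Int))) with hL
  have hinj : Function.Injective (fun j : Nat => pvFmt (1 + (j : Int))) := by
    intro a b h
    have := pvFmt_inj (a := 1 + (a : Int)) (b := 1 + (b : Int)) (by omega) (by omega) h
    omega
  have hndL : L.Nodup := List.Nodup.map hinj List.nodup_range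
  have hsub : L.toFinset ⊆ (ids : List String).toFinset := by
    intro x hx
    rw [List.mem_toFinset] at hx ⊢
    obtain ⟨j, hj, rfl⟩ := List.mem_map.mp hx
    exact hall j (by have := List.mem_range.mp hj; omega)
  have hcard1 : L.toFinset.card = ids.length + 1 := by
    rw [List.toFinset_card_of_nodup hndL, hL, List.length_map, List.length_range]
  have hcard2 : (ids : List String).toFinset.card ≤ ids.length := List.toFinset_card_le _
  have := Finset.card_le_card hsub
  omega

-- ===== VERDICT (by name: the statement is the Claim_ definition above) =====
theorem generar_id_spec : Claim_equal_generar_id := by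
  unfold Claim_equal_generar_id
  intro vs _
  unfold Spec_generar_id generar_id generar_id_alt
  set ids := pvIdsA vs with hids
  -- the least free candidate n₀
  obtain ⟨j₁, hj₁, hfree₁⟩ := pv_exists_free ids
  have hex : ∃ j : Nat, PySem.Set.contains ids (pvFmt (1 + (j : Int))) = false := ⟨j₁, hfree₁⟩
  set j₀ := Nat.find hex with hj₀
  set n₀ : Int := 1 + (j₀ : Int) with hn₀
  have hfree : PySem.Set.contains ids (pvFmt n₀) = false := Nat.find_spec hex
  have hn₀1 : 1 ≤ n₀ := by omega
  have hmin : ∀ m : Int, 1 ≤ m → m < n₀ → PySem.Set.contains ids (pvFmt m) = true := by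
    intro m hm1 hm2
    have hj : (m - 1).toNat < j₀ := by omega
    have := Nat.find_min hex hj
    have hcast : (1 : Int) + ((m - 1).toNat : Int) = m := by omega
    rw [hcast] at this
    cases h : PySem.Set.contains ids (pvFmt m)
    · exact absurd h this
    · rfl
  have hbound : n₀ ≤ 1 + (ids.length : Int) := by
    have : j₀ ≤ j₁ := Nat.find_min' hex hfree₁
    omega
  -- A's side
  have hA : pvLoopA ids 1 (ids.length + 1) = pvFmt n₀ := by
    refine pvLoopA_least ids (ids.length + 1) 1 n₀ hn₀1 ?_ hfree hmin
    push_cast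
    omega
  -- B's side: membership of the sorted parsed list agrees with `contains ids ∘ pvFmt` on [1, ∞)
  have hmemB : ∀ m : Int, 1 ≤ m →
      (m ∈ PySem.List.sorted (pvUsados vs) (fun x => x) ↔
        PySem.Set.contains ids (pvFmt m) = true) := by
    intro m hm
    rw [PySem.List.mem_sorted, pvUsados_eq, PySem.Set.mem_ofList, pv_mem_parsed vs m hm,
      PySem.Set.contains_iff, hids, pvIdsA, PySem.Set.mem_ofList]
  have hB : pvScan 1 (PySem.List.sorted (pvUsados vs) (fun x => x)) = n₀ := by
    refine pvScan_least _ ?_ 1 n₀ hn₀1 ?_ ?_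
    · rw [pvUsados_eq]
      exact PySem.List.sorted_ofList_pairwise_lt _
    · intro hmem
      rw [hmemB n₀ hn₀1] at hmem
      rw [hmem] at hfree
      cases hfree
    · intro m hm1 hm2
      exact (hmemB m hm1).mpr (hmin m hm1 hm2)
  rw [hA]
  show pvFmt n₀ = pvFmt (pvScan 1 (PySem.List.sorted (pvUsados vs) (fun x => x)))
  rw [hB]
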